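-- pv_equiv track=rewrite | github.com/xuanminhcvp/short-image-flow | test_prompt_media_map_service.py | _extract_prompt_index_from_post_data
-- ===== SOURCE A (Python) =====
-- def _extract_prompt_index_from_post_data(post_data: str, prompt_list: list[str]) -> int:
--     """
--     Tìm prompt_index dựa trên nội dung post_data.
--     Ưu tiên match prompt dài hơn để tránh match nhầm chuỗi con.
--     """
--     text = str(post_data or "")
--     if not text:
--         return 0
--     ranked = sorted(
--         [(idx + 1, p) for idx, p in enumerate(prompt_list) if str(p).strip()],
--         key=lambda x: len(x[1]),
--         reverse=True,
--     )
--     for idx, p in ranked: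
--         if p in text:
--             return idx
--     return 0
-- ===== SOURCE B (Python) =====
-- def _extract_prompt_index_from_post_data(post_data: str, prompt_list: list[str]) -> int:
--     # Single pass keeping the best (longest, earliest) matching prompt; no sort, no intermediate list.
--     text = str(post_data or "")
--     if not text:
--         return 0
--     best_idx = 0
--     best_len = 0
--     for i, p in enumerate(prompt_list, 1):
--         q = str(p)
--         if len(q) > best_len and q.strip() and q in text:
--             best_idx, best_len = i, len(q)
--     return best_idx
-- ===== Notes on version B (the rewrite author's own statement) =====
-- stated objective: simpler
-- what changed: B replaces A's build-filter-sort-then-scan pipeline by a single pass over the prompts keeping the best (longest, earliest) matching prompt, so the sort and the intermediate ranked list disappear.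
import Mathlib
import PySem

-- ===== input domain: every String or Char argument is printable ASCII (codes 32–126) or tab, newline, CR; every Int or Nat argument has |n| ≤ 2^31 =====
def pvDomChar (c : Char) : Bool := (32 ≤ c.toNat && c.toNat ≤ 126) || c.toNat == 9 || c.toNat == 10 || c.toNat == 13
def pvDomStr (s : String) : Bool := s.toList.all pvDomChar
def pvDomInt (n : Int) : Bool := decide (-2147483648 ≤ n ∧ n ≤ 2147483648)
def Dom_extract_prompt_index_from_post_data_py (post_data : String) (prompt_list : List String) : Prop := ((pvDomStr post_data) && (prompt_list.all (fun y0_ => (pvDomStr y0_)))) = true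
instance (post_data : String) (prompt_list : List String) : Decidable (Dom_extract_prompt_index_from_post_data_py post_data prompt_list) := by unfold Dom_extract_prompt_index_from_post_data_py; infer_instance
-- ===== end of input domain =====

-- ===== PORT A =====
-- Port of A. `str(post_data or "")` is `post_data` itself for a str argument (empty stays empty),
-- and `str(p)` is `p`; both identities are applied in this transliteration.
def pvRankedLoop (text : String) : List (Int × String) → Int
  | [] => 0
  | (idx, p) :: rest => if PySem.Str.isIn p text then idx else pvRankedLoop text rest

def extract_prompt_index_from_post_data_py (post_data : String) (prompt_list : List String) : Int :=
  let text := post_data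
  if text = "" then 0
  else
    let ranked := PySem.List.sorted
      (((PySem.List.enumerate prompt_list).filter
          (fun ip => !(PySem.Str.strip ip.2 == ""))).map (fun ip => (ip.1 + 1, ip.2)))
      (fun x => PySem.Str.len x.2) true
    pvRankedLoop text ranked

-- ===== PORT B =====
-- Port of B (Source B): one left fold over enumerate(prompt_list, 1) keeping (best_idx, best_len).
def pvBestStep (text : String) (best : Int × Int) (ip : Int × String) : Int × Int :=
  if PySem.Str.len ip.2 > best.2 ∧ (PySem.Str.strip ip.2 == "") = false ∧ PySem.Str.isIn ip.2 text = true
  then (ip.1, PySem.Str.len ip.2) else best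

def extract_prompt_index_from_post_data_py_alt (post_data : String) (prompt_list : List String) : Int :=
  if post_data = "" then 0
  else ((PySem.List.enumerate prompt_list 1).foldl (pvBestStep post_data) ((0 : Int), (0 : Int))).1

-- ===== PRECONDITION & SPEC =====
def Spec_extract_prompt_index_from_post_data_py (post_data : String) (prompt_list : List String) (out : Int) : Prop := out = extract_prompt_index_from_post_data_py_alt post_data prompt_list
instance (post_data : String) (prompt_list : List String) (out : Int) : Decidable (Spec_extract_prompt_index_from_post_data_py post_data prompt_list out) := by unfold Spec_extract_prompt_index_from_post_data_py; infer_instance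

-- ===== CLAIM (what is proved, stated in full; the proofs are below) =====
def Claim_equal_extract_prompt_index_from_post_data_py : Prop := ∀ (post_data : String) (prompt_list : List String), Dom_extract_prompt_index_from_post_data_py post_data prompt_list → Spec_extract_prompt_index_from_post_data_py post_data prompt_list (extract_prompt_index_from_post_data_py post_data prompt_list)

-- ===== LEMMAS AND PROOFS =====

-- the (strict) order in which A's stable descending sort arranges pairs with distinct first components
def pvLex (a b : Int × String) : Prop :=
  PySem.Str.len b.2 < PySem.Str.len a.2 ∨ (PySem.Str.len a.2 = PySem.Str.len b.2 ∧ a.1 < b.1)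

theorem pvLex_trans {a b c : Int × String} (h1 : pvLex a b) (h2 : pvLex b c) : pvLex a c := by
  unfold pvLex at *; rcases h1 with h1 | ⟨h1, h1'⟩ <;> rcases h2 with h2 | ⟨h2, h2'⟩ <;>
    first | (left; omega) | (right; constructor <;> omega)

theorem pv_insertBy_pairwise_lex (x : Int × String) (acc : List (Int × String))
    (hp : acc.Pairwise pvLex) (hlt : ∀ a ∈ acc, a.1 < x.1) :
    (PySem.List.insertBy (fun a b => decide (PySem.Str.len b.2 < PySem.Str.len a.2)) x acc).Pairwise pvLex := by
  induction acc with
  | nil => simp [PySem.List.insertBy]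
  | cons y ys ih =>
    rw [List.pairwise_cons] at hp
    rw [PySem.List.insertBy]
    by_cases hb : PySem.Str.len y.2 < PySem.Str.len x.2
    · rw [if_pos (by simpa using hb)]
      refine List.Pairwise.cons ?_ (List.Pairwise.cons hp.1 hp.2)
      intro z hz
      rcases List.mem_cons.mp hz with rfl | hz
      · exact Or.inl hb
      · exact pvLex_trans (Or.inl hb) (hp.1 z hz)
    · rw [if_neg (by simpa using hb)]
      refine List.Pairwise.cons ?_
        (ih hp.2 (fun a ha => hlt a (List.mem_cons_of_mem _ ha)))
      intro z hz
      rcases (PySem.List.mem_insertBy _ _ _ _).mp hz with rfl | hz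
      · rcases lt_or_eq_of_le (le_of_not_gt hb) with h | h
        · exact Or.inl h
        · exact Or.inr ⟨h.symm, hlt y (List.mem_cons_self)⟩
      · exact hp.1 z hz

theorem pv_sorted_rev_pairwise_lex (E : List (Int × String))
    (hE : E.Pairwise (fun a b => a.1 < b.1)) :
    (PySem.List.sorted E (fun e => PySem.Str.len e.2) true).Pairwise pvLex := by
  rw [PySem.List.sorted_rev_eq_foldl_insertBy]
  have main : ∀ (l acc : List (Int × String)), acc.Pairwise pvLex →
      (∀ a ∈ acc, ∀ e ∈ l, a.1 < e.1) → l.Pairwise (fun a b => a.1 < b.1) →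
      (l.foldl (fun acc x =>
        PySem.List.insertBy (fun a b => decide (PySem.Str.len b.2 < PySem.Str.len a.2)) x acc) acc).Pairwise pvLex := by
    intro l
    induction l with
    | nil => intro acc hacc _ _; simpa using hacc
    | cons x rest ih =>
      intro acc hacc hsep hl
      rw [List.pairwise_cons] at hl
      refine ih _ (pv_insertBy_pairwise_lex x acc hacc
        (fun a ha => hsep a ha x (List.mem_cons_self))) ?_ hl.2
      intro a ha e he
      rcases (PySem.List.mem_insertBy _ _ _ _).mp ha with rfl | ha
      · exact hl.1 e he
      · exact hsep a ha e (List.mem_cons_of_mem _ he)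
  exact main E [] (by simp) (by simp) hE

theorem pvRankedLoop_of_no_match (text : String) (S : List (Int × String))
    (h : ∀ e ∈ S, PySem.Str.isIn e.2 text = false) : pvRankedLoop text S = 0 := by
  induction S with
  | nil => rfl
  | cons e rest ih =>
    obtain ⟨idx, p⟩ := e
    rw [pvRankedLoop, if_neg]
    · exact ih (fun e' he' => h e' (List.mem_cons_of_mem _ he'))
    · have hx := h (idx, p) List.mem_cons_self
      simpa using hx

theorem pvRankedLoop_of_match (text : String) (S : List (Int × String))
    (hp : S.Pairwise pvLex) (e0 : Int × String) (he0 : e0 ∈ S)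
    (hm0 : PySem.Str.isIn e0.2 text = true) :
    ∃ e ∈ S, PySem.Str.isIn e.2 text = true ∧ pvRankedLoop text S = e.1 ∧
      ∀ e' ∈ S, PySem.Str.isIn e'.2 text = true → e' = e ∨ pvLex e e' := by
  induction S with
  | nil => cases he0
  | cons x rest ih =>
    rw [List.pairwise_cons] at hp
    by_cases hx : PySem.Str.isIn x.2 text = true
    · refine ⟨x, List.mem_cons_self, hx, ?_, ?_⟩
      · obtain ⟨idx, p⟩ := x; rw [pvRankedLoop, if_pos hx]
      · intro e' he' _
        rcases List.mem_cons.mp he' with rfl | he'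
        · exact Or.inl rfl
        · exact Or.inr (hp.1 e' he')
    · have he0' : e0 ∈ rest := by
        rcases List.mem_cons.mp he0 with rfl | h'
        · exact absurd hm0 hx
        · exact h'
      obtain ⟨e, heS, hme, hloop, hmax⟩ := ih hp.2 he0'
      refine ⟨e, List.mem_cons_of_mem _ heS, hme, ?_, ?_⟩
      · obtain ⟨idx, p⟩ := x
        rw [pvRankedLoop, if_neg (by simpa using hx)]
        exact hloop
      · intro e' he' hme'
        rcases List.mem_cons.mp he' with rfl | he'
        · exact absurd hme' hx
        · exact hmax e' he' hme' 

theorem pv_foldl_stay (text : String) (rest : List (Int × String)) (b : Int × Int)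
    (h : ∀ e ∈ rest, PySem.Str.isIn e.2 text = true → PySem.Str.len e.2 ≤ b.2) :
    rest.foldl (pvBestStep text) b = b := by
  induction rest with
  | nil => rfl
  | cons x l ih =>
    rw [List.foldl_cons]
    have hx : pvBestStep text b x = b := by
      rw [pvBestStep, if_neg]
      rintro ⟨h1, _, h3⟩
      exact absurd (h x List.mem_cons_self h3) (not_le.mpr h1)
    rw [hx]
    exact ih (fun e he hm => h e (List.mem_cons_of_mem _ he) hm)

theorem pv_foldl_no_match (text : String) (E : List (Int × String)) (b : Int × Int)
    (h : ∀ e ∈ E, PySem.Str.isIn e.2 text = false) : E.foldl (pvBestStep text) b = b := by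
  induction E generalizing b with
  | nil => rfl
  | cons x l ih =>
    rw [List.foldl_cons]
    have hx : pvBestStep text b x = b := by
      rw [pvBestStep, if_neg]
      rintro ⟨_, _, h3⟩
      have hx := h x List.mem_cons_self
      rw [hx] at h3
      exact Bool.false_ne_true h3
    rw [hx]
    exact ih _ (fun e he => h e (List.mem_cons_of_mem _ he))

theorem pv_foldl_best (text : String) (E : List (Int × String)) (b : Int × Int) (e : Int × String)
    (hfst : E.Pairwise (fun a b' => a.1 < b'.1))
    (hlen : ∀ e' ∈ E, 1 ≤ PySem.Str.len e'.2)
    (hstrip : ∀ e' ∈ E, (PySem.Str.strip e'.2 == "") = false)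
    (he : e ∈ E) (hm : PySem.Str.isIn e.2 text = true)
    (hmax : ∀ e' ∈ E, PySem.Str.isIn e'.2 text = true → e' = e ∨ pvLex e e')
    (hb : b.2 < PySem.Str.len e.2) :
    (E.foldl (pvBestStep text) b).1 = e.1 := by
  induction E generalizing b with
  | nil => cases he
  | cons x rest ih =>
    rw [List.pairwise_cons] at hfst
    rcases List.mem_cons.mp he with rfl | he'
    · rw [List.foldl_cons, pvBestStep,
        if_pos ⟨hb, hstrip e (List.mem_cons_self), hm⟩]
      rw [pv_foldl_stay]
      intro e' he' hme'
      have hne : e' ≠ e := by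
        intro h; exact absurd (hfst.1 e' he') (by rw [h]; exact lt_irrefl _)
      rcases hmax e' (List.mem_cons_of_mem _ he') hme' with h | h
      · exact absurd h hne
      · rcases h with h | ⟨h, _⟩
        · exact le_of_lt h
        · exact le_of_eq h.symm
    · rw [List.foldl_cons]
      have hb' : (pvBestStep text b x).2 < PySem.Str.len e.2 := by
        rw [pvBestStep]
        split_ifs with hcond
        · rcases hmax x (List.mem_cons_self) hcond.2.2 with h | h
          · exact absurd (hfst.1 e he') (by rw [h]; exact lt_irrefl _)
          · rcases h with h | ⟨_, h2⟩
            · exact h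
            · exact absurd (hfst.1 e he') (by omega)
        · exact hb
      exact ih _ hfst.2 (fun e' h => hlen e' (List.mem_cons_of_mem _ h))
        (fun e' h => hstrip e' (List.mem_cons_of_mem _ h)) he'
        (fun e' h hm' => hmax e' (List.mem_cons_of_mem _ h) hm') hb' 

theorem pv_filter_enum (xs : List String) :
    ((PySem.List.enumerate xs).filter (fun ip => !(PySem.Str.strip ip.2 == ""))).map
        (fun ip => (ip.1 + 1, ip.2)) =
      (PySem.List.enumerate xs 1).filter (fun ip => !(PySem.Str.strip ip.2 == "")) := by
  have main : ∀ (l : List String) (s : Int),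
      ((PySem.List.enumerate l s).filter (fun ip => !(PySem.Str.strip ip.2 == ""))).map
        (fun ip => (ip.1 + 1, ip.2)) =
      (PySem.List.enumerate l (s + 1)).filter (fun ip => !(PySem.Str.strip ip.2 == "")) := by
    intro l
    induction l with
    | nil => intro s; simp [PySem.List.enumerate_nil]
    | cons x t ih =>
      intro s
      rw [PySem.List.enumerate_cons, PySem.List.enumerate_cons]
      by_cases hx : (PySem.Str.strip x == "") = true
      · rw [List.filter_cons_of_neg (by simpa using hx),
          List.filter_cons_of_neg (by simpa using hx), ih]
      · rw [List.filter_cons_of_pos (by simpa using hx),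
          List.filter_cons_of_pos (by simpa using hx), List.map_cons, ih]
  simpa using main xs 0

theorem pv_foldl_filter (text : String) (xs : List (Int × String)) (b : Int × Int) :
    xs.foldl (pvBestStep text) b =
      (xs.filter (fun ip => !(PySem.Str.strip ip.2 == ""))).foldl (pvBestStep text) b := by
  induction xs generalizing b with
  | nil => rfl
  | cons x l ih =>
    by_cases hx : (PySem.Str.strip x.2 == "") = true
    · rw [List.filter_cons_of_neg (by simpa using hx), List.foldl_cons]
      have hstep : pvBestStep text b x = b := by
        rw [pvBestStep, if_neg]
        rintro ⟨_, h2, _⟩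
        rw [hx] at h2; cases h2
      rw [hstep, ih]
    · rw [List.filter_cons_of_pos (by simpa using hx), List.foldl_cons, List.foldl_cons, ih]

theorem pv_len_pos_of_strip_ne (s : String) (h : (PySem.Str.strip s == "") = false) :
    1 ≤ PySem.Str.len s := by
  by_cases hs : s = ""
  · subst hs; exact absurd h (by decide)
  · rw [PySem.Str.len_eq]
    cases hl : s.toList with
    | nil => exact absurd (by simpa using hl) hs
    | cons c t => simp

-- ===== VERDICT (by name: the statement is the Claim_ definition above) =====
theorem extract_prompt_index_from_post_data_py_spec : Claim_equal_extract_prompt_index_from_post_data_py := by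
  intro post_data prompt_list _hdom
  unfold Spec_extract_prompt_index_from_post_data_py
  unfold extract_prompt_index_from_post_data_py extract_prompt_index_from_post_data_py_alt
  by_cases hpd : post_data = ""
  · rw [if_pos hpd, if_pos hpd]
  · rw [if_neg hpd, if_neg hpd]
    rw [pv_foldl_filter, pv_filter_enum]
    have hfst : ((PySem.List.enumerate prompt_list 1).filter
        (fun ip => !(PySem.Str.strip ip.2 == ""))).Pairwise (fun a b => a.1 < b.1) :=
      (PySem.List.pairwise_lt_enumerate prompt_list 1).filter _
    have hstrip : ∀ e ∈ (PySem.List.enumerate prompt_list 1).filter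
        (fun ip => !(PySem.Str.strip ip.2 == "")), (PySem.Str.strip e.2 == "") = false := by
      intro e he
      have := List.of_mem_filter he
      simpa using this
    have hlen : ∀ e ∈ (PySem.List.enumerate prompt_list 1).filter
        (fun ip => !(PySem.Str.strip ip.2 == "")), 1 ≤ PySem.Str.len e.2 :=
      fun e he => pv_len_pos_of_strip_ne _ (hstrip e he)
    by_cases hnm : ∀ e ∈ (PySem.List.enumerate prompt_list 1).filter
        (fun ip => !(PySem.Str.strip ip.2 == "")), PySem.Str.isIn e.2 post_data = false
    · rw [pvRankedLoop_of_no_match _ _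
        (fun e he => hnm e ((PySem.List.mem_sorted _ _ _ _).mp he)),
        pv_foldl_no_match _ _ _ hnm]
    · push Not at hnm
      obtain ⟨e0, he0, hm0⟩ := hnm
      have hm0' : PySem.Str.isIn e0.2 post_data = true := by
        cases h : PySem.Str.isIn e0.2 post_data
        · exact absurd h hm0
        · rfl
      obtain ⟨e, heS, hme, hloop, hmax⟩ := pvRankedLoop_of_match post_data _
        (pv_sorted_rev_pairwise_lex _ hfst) e0
        ((PySem.List.mem_sorted _ _ _ _).mpr he0) hm0'
      have heE := (PySem.List.mem_sorted _ _ _ _).mp heS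
      rw [hloop]
      exact (pv_foldl_best post_data _ _ e hfst hlen hstrip heE hme
        (fun e' he' h' => hmax e' ((PySem.List.mem_sorted _ _ _ _).mpr he') h')
        (by have := hlen e heE; simpa using (by omega : (0:Int) < PySem.Str.len e.2))).symm
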